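-- pv_equiv track=rewrite | github.com/Dslpss/dbdouble | services/verabet_patterns.py | detectar_padrao5
-- ===== SOURCE A (Python) =====
-- from typing import List, Optional, Dict, Tuple
--
-- def detectar_padrao5(historico: List[str]) -> Tuple[bool, Optional[str], str, int]:
--     """
--     Padrão 5: Branco como reset de tendência
--     Após sequência de 3+ seguida de Branco, sugere a cor oposta à tendência
--     Confiança: BAIXA-MÉDIA (55%)
--     """
--     if len(historico) < 4:
--         return False, None, "", 0
--     if historico[-1] == "B":
--         if historico[-2] not in ("V", "P"):
--             return False, None, "", 0
--         run_color = historico[-2]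
--         run = 1
--         for i in range(len(historico) - 2, -1, -1):
--             if historico[i] == run_color:
--                 run += 1
--             else:
--                 break
--         if run >= 3:
--             suggested = "P" if run_color == "V" else "V"
--             return True, suggested, "baixa", 55
--     return False, None, "", 0
-- ===== SOURCE B (Python) =====
-- from itertools import groupby
-- from typing import List, Optional, Tuple
--
-- def detectar_padrao5(historico: List[str]) -> Tuple[bool, Optional[str], str, int]:
--     if len(historico) < 4:
--         return False, None, "", 0
--     groups = [(k, sum(1 for _ in g)) for k, g in groupby(historico)]
--     if groups[-1] != ("B", 1):
--         return False, None, "", 0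
--     c, n = groups[-2]
--     if c in ("V", "P") and n >= 2:
--         return True, ("P" if c == "V" else "V"), "baixa", 55
--     return False, None, "", 0
-- ===== Notes on version B (the rewrite author's own statement) =====
-- stated objective: alternative
-- what changed: B builds the run-length encoding of the whole history with itertools.groupby in one forward pass and decides from the last two (color, count) groups, replacing A's manual backward index loop with a break; the loop over indices disappears.
import Mathlib
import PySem

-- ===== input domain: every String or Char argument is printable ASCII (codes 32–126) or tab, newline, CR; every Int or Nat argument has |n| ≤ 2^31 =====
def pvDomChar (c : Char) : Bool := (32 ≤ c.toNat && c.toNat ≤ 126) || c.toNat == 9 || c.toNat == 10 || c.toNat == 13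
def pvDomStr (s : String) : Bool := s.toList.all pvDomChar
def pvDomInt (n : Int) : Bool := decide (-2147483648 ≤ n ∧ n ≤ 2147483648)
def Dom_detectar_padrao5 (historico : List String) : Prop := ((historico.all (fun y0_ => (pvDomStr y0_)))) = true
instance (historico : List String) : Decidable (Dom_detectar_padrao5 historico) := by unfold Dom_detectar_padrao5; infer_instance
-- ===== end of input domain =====

-- B replaces A's manual backward index loop (with break) by a run-length encoding of the
-- reversed history (itertools.groupby), deciding from its first two (color, count) groups.

-- ===== PORT A =====
-- A's backward 'for i in range(len(h)-2, -1, -1): … else break' loop; every visited index is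
-- in range, so pyGetD with a dummy default is exact here
def runLoop5 (historico : List String) (run_color : String) : List Int → Int → Int
  | [], run => run
  | i :: rest, run =>
    if PySem.List.pyGetD historico i "" = run_color then
      runLoop5 historico run_color rest (run + 1)
    else run

def detectar_padrao5 (historico : List String) : Bool × Option String × String × Int :=
  if historico.length < 4 then (false, none, "", 0)
  else if PySem.List.pyGetD historico (-1) "" = "B" then
    -- historico[-1], historico[-2] are in range since length ≥ 4
    let run_color := PySem.List.pyGetD historico (-2) ""
    if ¬(run_color = "V" ∨ run_color = "P") then (false, none, "", 0)
    else
      let run := runLoop5 historico run_color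
        (PySem.List.pyRange ((historico.length : Int) - 2) (-1) (-1)) 1
      if run ≥ 3 then (true, some (if run_color = "V" then "P" else "V"), "baixa", 55)
      else (false, none, "", 0)
  else (false, none, "", 0)

-- ===== PORT B =====
-- itertools.groupby as a run-length encoding: list of (value, count) groups
def rle5 : List String → List (String × Int)
  | [] => []
  | x :: xs =>
    match rle5 xs with
    | [] => [(x, 1)]
    | (y, n) :: rest => if x = y then (y, n + 1) :: rest else (x, 1) :: (y, n) :: rest

def detectar_padrao5_alt (historico : List String) : Bool × Option String × String × Int :=
  if historico.length < 4 then (false, none, "", 0)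
  else
    let groups := rle5 historico.reverse
    if ¬ (groups.getD 0 ("", 0) = ("B", 1)) then (false, none, "", 0)
    else
      -- group 1 exists whenever the guard above passed and length ≥ 4
      let g := groups.getD 1 ("", 0)
      if (g.1 = "V" ∨ g.1 = "P") ∧ g.2 ≥ 2 then
        (true, some (if g.1 = "V" then "P" else "V"), "baixa", 55)
      else (false, none, "", 0)

-- ===== PRECONDITION & SPEC =====
def Spec_detectar_padrao5 (historico : List String) (out : Bool × Option String × String × Int) : Prop := out = detectar_padrao5_alt historico
instance (historico : List String) (out : Bool × Option String × String × Int) : Decidable (Spec_detectar_padrao5 historico out) := by unfold Spec_detectar_padrao5; infer_instance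

-- ===== CLAIM (what is proved, stated in full; the proofs are below) =====
def Claim_equal_detectar_padrao5 : Prop := ∀ (historico : List String), Dom_detectar_padrao5 historico → Spec_detectar_padrao5 historico (detectar_padrao5 historico)

-- ===== LEMMAS AND PROOFS =====

-- common normal form of both programs on a history whose reversal is a :: b :: t
def spec5 (a b : String) (t : List String) : Bool × Option String × String × Int :=
  if a = "B" ∧ (b = "V" ∨ b = "P") ∧ 1 ≤ (t.takeWhile (fun z => z = b)).length then
    (true, some (if b = "V" then "P" else "V"), "baixa", 55)
  else (false, none, "", 0)

-- one step of rle5: the head group collects the leading run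
lemma rle5_cons (x : String) (xs : List String) :
    rle5 (x :: xs)
      = (x, 1 + ((xs.takeWhile (fun z => z = x)).length : Int))
          :: rle5 (xs.dropWhile (fun z => z = x)) := by
  induction xs generalizing x with
  | nil => simp [rle5]
  | cons y ys ih =>
    by_cases hxy : y = x
    · subst hxy
      rw [show rle5 (y :: y :: ys) = match rle5 (y :: ys) with
            | [] => [(y, 1)]
            | (z, n) :: rest => if y = z then (z, n + 1) :: rest
              else (y, 1) :: (z, n) :: rest from rfl]
      rw [ih y]
      simp
      ring
    · rw [show rle5 (x :: y :: ys) = match rle5 (y :: ys) with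
            | [] => [(x, 1)]
            | (z, n) :: rest => if x = z then (z, n + 1) :: rest
              else (x, 1) :: (z, n) :: rest from rfl]
      rw [ih y]
      have hxy' : ¬ (x = y) := fun h => hxy h.symm
      simp [hxy, hxy']
      rw [← ih y]

-- positive indexing, in range: pyGetD is plain getElem
lemma pyGetD_in_range (h : List String) (m : Nat) (hm : m < h.length) :
    PySem.List.pyGetD h ((m : Nat) : Int) "" = h[m] := by
  rw [PySem.List.pyGetD_natCast]
  simp [List.getD_eq_getElem?_getD, List.getElem?_eq_getElem hm]

-- A's backward loop counts 1 + the length of the run ending at index m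
lemma runLoop5_eq (h : List String) (rc : String) :
    ∀ (m : Nat) (k : Int), m < h.length →
      runLoop5 h rc (PySem.List.pyRange (m : Int) (-1) (-1)) k
        = k + (((h.take (m+1)).reverse.takeWhile (fun z => z = rc)).length : Int) := by
  intro m
  induction m with
  | zero =>
    intro k hm
    have hg : PySem.List.pyGetD h (0 : Int) "" = h[0] := pyGetD_in_range h 0 hm
    have ht : h.take 1 = [h[0]] := by
      rw [List.take_add_one]
      simp [List.getElem?_eq_getElem hm]
    rw [show ((0:Nat):Int) = 0 by norm_num,
        PySem.List.pyRange_neg_one_cons (by norm_num),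
        show (0:Int) - 1 = -1 by norm_num,
        PySem.List.pyRange_neg_one_eq_nil (by norm_num)]
    by_cases hb : h[0] = rc
    · simp [runLoop5, hg, hb, ht]
    · simp [runLoop5, hg, hb, ht]
  | succ m ih =>
    intro k hm
    have hlt : (-1 : Int) < ((m+1 : Nat) : Int) := by push_cast; omega
    rw [PySem.List.pyRange_neg_one_cons hlt,
        show ((m+1 : Nat) : Int) - 1 = ((m : Nat) : Int) by push_cast; ring]
    have hg : PySem.List.pyGetD h ((m+1 : Nat) : Int) "" = h[m+1] := pyGetD_in_range h (m+1) hm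
    have ht : h.take (m+2) = h.take (m+1) ++ [h[m+1]] := by
      rw [List.take_add_one]
      simp [List.getElem?_eq_getElem hm]
    by_cases hb : h[m+1] = rc
    · simp only [runLoop5, hg, hb]
      rw [ih (k+1) (by omega)]
      rw [show m + 1 + 1 = m + 2 from rfl, ht]
      rw [List.reverse_append]
      simp [hb]
      ring
    · have hcond : ¬ (PySem.List.pyGetD h ((m+1 : Nat) : Int) "" = rc) := by
        rw [hg]; exact hb
      simp only [runLoop5, if_neg hcond]
      rw [show m + 1 + 1 = m + 2 from rfl, ht]
      rw [List.reverse_append]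
      simp [hb]

-- negative indexing: xs[-j] is xs[len - j] once 1 ≤ j ≤ len
lemma pyGet5_neg (xs : List String) (j : Nat) (h1 : 1 ≤ j) (h2 : j ≤ xs.length) :
    PySem.List.pyGet? xs (-(j : Int)) = xs[xs.length - j]? := by
  simp only [PySem.List.pyGet?, PySem.List.pyIdx?]
  rw [if_neg (by omega), if_pos (by omega)]
  simp

lemma pyGetD_neg_one (t : List String) (a b : String) :
    PySem.List.pyGetD (t.reverse ++ [b, a]) (-1) "" = a := by
  have h := pyGet5_neg (t.reverse ++ [b, a]) 1 (by norm_num)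
    (by simp only [List.length_append, List.length_reverse, List.length_cons,
          List.length_nil]; omega)
  rw [show (-1 : Int) = -((1 : Nat) : Int) by norm_num]
  simp only [PySem.List.pyGetD, h]
  rw [show (t.reverse ++ [b, a]).length - 1 = t.reverse.length + 1 by simp]
  rw [List.getElem?_append_right (by omega)]
  simp

lemma pyGetD_neg_two (t : List String) (a b : String) :
    PySem.List.pyGetD (t.reverse ++ [b, a]) (-2) "" = b := by
  have h := pyGet5_neg (t.reverse ++ [b, a]) 2 (by norm_num)
    (by simp only [List.length_append, List.length_reverse, List.length_cons,
          List.length_nil]; omega)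
  rw [show (-2 : Int) = -((2 : Nat) : Int) by norm_num]
  simp only [PySem.List.pyGetD, h]
  rw [show (t.reverse ++ [b, a]).length - 2 = t.reverse.length by simp]
  rw [List.getElem?_append_right (le_refl _)]
  simp

-- A evaluated on a history whose reversal is a :: b :: t
lemma A_eval (a b : String) (t : List String) (ht2 : 2 ≤ t.length) :
    detectar_padrao5 (t.reverse ++ [b, a]) = spec5 a b t := by
  have hlen' : ¬ ((t.reverse ++ [b, a]).length < 4) := by simp; omega
  have hrun : runLoop5 (t.reverse ++ [b, a]) b
      (PySem.List.pyRange (((t.reverse ++ [b, a]).length : Int) - 2) (-1) (-1)) 1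
      = 2 + ((t.takeWhile (fun z => z = b)).length : Int) := by
    have hcast : (((t.reverse ++ [b, a]).length : Nat) : Int) - 2 = ((t.length : Nat) : Int) := by
      simp
    rw [hcast, runLoop5_eq _ _ t.length 1 (by simp)]
    have htake : (t.reverse ++ [b, a]).take (t.length + 1) = t.reverse ++ [b] := by
      rw [List.take_append]
      simp
    rw [htake, List.reverse_append]
    simp
    omega
  simp only [detectar_padrao5, if_neg hlen', pyGetD_neg_one, pyGetD_neg_two]
  by_cases haB : a = "B"
  · subst haB
    rw [if_pos rfl]
    by_cases hbVP : b = "V" ∨ b = "P"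
    · rw [if_neg (not_not_intro hbVP), hrun]
      by_cases hk : 1 ≤ (t.takeWhile (fun z => z = b)).length
      · rw [if_pos (by omega)]
        rcases hbVP with h | h <;> subst h <;> simp [spec5, hk]
      · rw [if_neg (by omega)]
        simp [spec5, hk]
    · rw [if_pos hbVP]
      simp [spec5, hbVP]
  · rw [if_neg haB]
    simp [spec5, haB]

-- B evaluated on a history whose reversal is a :: b :: t
lemma B_eval (a b : String) (t : List String) (ht2 : 2 ≤ t.length) :
    detectar_padrao5_alt (t.reverse ++ [b, a]) = spec5 a b t := by
  have hlen' : ¬ ((t.reverse ++ [b, a]).length < 4) := by simp; omega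
  have hrev : (t.reverse ++ [b, a]).reverse = a :: b :: t := by simp
  simp only [detectar_padrao5_alt, if_neg hlen', hrev, rle5_cons]
  by_cases haB : a = "B"
  · subst haB
    by_cases hba : b = "B"
    · subst hba
      -- first group has count ≥ 2: guard fails; spec5 also fails since "B" ∉ {V,P}
      rw [if_pos (by
        simp [Prod.ext_iff]
        omega)]
      simp [spec5]
    · -- first group is ("B", 1); second group is (b, 1 + run of b in t)
      have htw : (b :: t).takeWhile (fun z => z = "B") = [] := by
        simp [hba]
      have hdw : (b :: t).dropWhile (fun z => z = "B") = b :: t := by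
        simp [hba]
      rw [htw, hdw, rle5_cons]
      rw [if_neg (by simp)]
      simp only [List.getD_cons_succ, List.getD_cons_zero]
      by_cases hbVP : b = "V" ∨ b = "P"
      · by_cases hk : 1 ≤ (t.takeWhile (fun z => z = b)).length
        · rw [if_pos ⟨hbVP, by omega⟩]
          rcases hbVP with h | h <;> subst h <;> simp [spec5, hk]
        · rw [if_neg (by rintro ⟨-, h⟩; omega)]
          simp [spec5, hk]
      · rw [if_neg (by rintro ⟨h, -⟩; exact hbVP h)]
        simp [spec5, hbVP]
  · rw [if_pos (by simp [Prod.ext_iff, haB])]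
    simp [spec5, haB]

-- ===== VERDICT (by name: the statement is the Claim_ definition above) =====
theorem detectar_padrao5_spec : Claim_equal_detectar_padrao5 := by
  unfold Claim_equal_detectar_padrao5 Spec_detectar_padrao5
  intro h _dom
  by_cases hlen : h.length < 4
  · simp [detectar_padrao5, detectar_padrao5_alt, hlen]
  · rw [not_lt] at hlen
    have hlr : h.reverse.length = h.length := List.length_reverse
    obtain ⟨a, b, t, hr⟩ : ∃ a b t, h.reverse = a :: b :: t := by
      match e : h.reverse with
      | [] => rw [e] at hlr; simp at hlr; omega
      | [a] => rw [e] at hlr; simp at hlr; omega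
      | a :: b :: t => exact ⟨a, b, t, rfl⟩
    have hh : h = t.reverse ++ [b, a] := by
      have := congrArg List.reverse hr
      simpa using this
    have ht2 : 2 ≤ t.length := by
      rw [hr] at hlr
      simp at hlr
      omega
    rw [hh, A_eval a b t ht2, B_eval a b t ht2]
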